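-- pv_equiv track=rewrite | github.com/pseudocoder10/Lockout-Bot | utils/updation.py | no_change_possible
-- ===== SOURCE A (Python) =====
-- def match_score(status):
--     a, b = 0, 0
--
--     for i in range(5):
--         if status[i] == '1':
--             a += 100 * (i + 1)
--         if status[i] == '2':
--             b += 100 * (i + 1)
--         if status[i] == '3':
--             a += 50 * (i + 1)
--             b += 50 * (i + 1)
--
--     return a, b
--
-- def no_change_possible(match_status):
--     a, b = match_score(match_status)
--     left = 0
--     for i in range(5):
--         if match_status[i] == '0':
--             left += (i + 1) * 100
--
--     if abs(a - b) > left or left == 0: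
--         return True
--     return False
-- ===== SOURCE B (Python) =====
-- def no_change_possible(match_status):
--     # Brute force: enumerate every possible completion of the undecided
--     # problems and check that they all produce the same match outcome.
--     diff = 0          # fixed part of (score1 - score2); draws ('3') cancel
--     finals = [0]      # all achievable extra differences from undecided problems
--     for i in range(5):
--         c = match_status[i]
--         w = (i + 1) * 100
--         if c == '1':
--             diff += w
--         elif c == '2':
--             diff -= w
--         elif c == '0':
--             finals = [f + d for f in finals for d in (-w, 0, w)]
--
--     def sign(x):
--         return (x > 0) - (x < 0)
--
--     s0 = sign(diff + finals[0])
--     return all(sign(diff + f) == s0 for f in finals)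
-- ===== Notes on version B (the rewrite author's own statement) =====
-- stated objective: alternative
-- what changed: B decides the match by brute-force enumeration: it builds the list of all achievable final score differences over every completion of the undecided problems and returns whether all completions yield the same winner sign, instead of A's arithmetic test abs(a-b) > left or left == 0 on reconstructed scores.
import Mathlib
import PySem

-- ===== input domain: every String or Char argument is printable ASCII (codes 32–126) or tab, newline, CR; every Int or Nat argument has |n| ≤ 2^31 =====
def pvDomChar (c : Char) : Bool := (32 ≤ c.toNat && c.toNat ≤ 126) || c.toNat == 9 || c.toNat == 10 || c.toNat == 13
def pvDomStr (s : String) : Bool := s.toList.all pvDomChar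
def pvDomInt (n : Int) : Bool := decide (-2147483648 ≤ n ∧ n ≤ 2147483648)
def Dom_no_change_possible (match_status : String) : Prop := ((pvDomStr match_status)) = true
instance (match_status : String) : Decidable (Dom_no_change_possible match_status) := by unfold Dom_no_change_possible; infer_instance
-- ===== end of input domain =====

-- B replaces A's arithmetic test (|a-b| > left or left == 0 on reconstructed scores) by brute-force
-- enumeration of every completion of the undecided problems, checking all yield the same winner sign
-- (objective: alternative).

-- ===== PORT A =====
-- status[i]: Python raises IndexError when pyGet? is none; those inputs are excluded by Pre_, so the ' ' default is never reached inside Pre_.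
def pvGetC (cs : List Char) (i : Int) : Char := (PySem.List.pyGet? cs i).getD ' '

-- loop body of match_score
def pvStepA (cs : List Char) (ab : Int × Int) (i : Int) : Int × Int :=
  let c := pvGetC cs i
  let ab := if c = '1' then (ab.1 + 100 * (i + 1), ab.2) else ab
  let ab := if c = '2' then (ab.1, ab.2 + 100 * (i + 1)) else ab
  if c = '3' then (ab.1 + 50 * (i + 1), ab.2 + 50 * (i + 1)) else ab

def match_score (status : String) : Int × Int :=
  (PySem.List.pyRange 0 5 1).foldl (pvStepA status.toList) (0, 0)

-- loop body of A's `left` loop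
def pvStepL (cs : List Char) (l : Int) (i : Int) : Int :=
  if pvGetC cs i = '0' then l + (i + 1) * 100 else l

def no_change_possible (match_status : String) : Bool :=
  let ab := match_score match_status
  let left : Int := (PySem.List.pyRange 0 5 1).foldl (pvStepL match_status.toList) 0
  if |ab.1 - ab.2| > left ∨ left = 0 then true else false

-- ===== PORT B =====
-- loop body of B's loop: state = (fixed diff, list of achievable extra differences)
def pvStepB (cs : List Char) (st : Int × List Int) (i : Int) : Int × List Int :=
  let c := pvGetC cs i
  let w := (i + 1) * 100
  if c = '1' then (st.1 + w, st.2)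
  else if c = '2' then (st.1 - w, st.2)
  else if c = '0' then (st.1, st.2.flatMap (fun f => [f + -w, f + 0, f + w]))
  else st

-- Python's sign(x) = (x > 0) - (x < 0)
def pvSign (x : Int) : Int := (if 0 < x then 1 else 0) - (if x < 0 then 1 else 0)

def no_change_possible_alt (match_status : String) : Bool :=
  let st := (PySem.List.pyRange 0 5 1).foldl (pvStepB match_status.toList) (0, [0])
  let s0 := pvSign (st.1 + (PySem.List.pyGet? st.2 0).getD 0)
  st.2.all (fun f => pvSign (st.1 + f) == s0)

-- ===== PRECONDITION & SPEC =====
-- A raises IndexError (status[i] for i < 5) on strings shorter than 5 characters; Pre_ excludes exactly those.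
def Pre_no_change_possible (match_status : String) : Prop := 5 ≤ match_status.toList.length
instance (match_status : String) : Decidable (Pre_no_change_possible match_status) := by unfold Pre_no_change_possible; infer_instance
def pvWitness_no_change_possible : String := "12300"

def Spec_no_change_possible (match_status : String) (out : Bool) : Prop := out = no_change_possible_alt match_status
instance (match_status : String) (out : Bool) : Decidable (Spec_no_change_possible match_status out) := by unfold Spec_no_change_possible; infer_instance

-- ===== CLAIM (what is proved, stated in full; the proofs are below) =====
def Claim_equal_no_change_possible : Prop := ∀ (match_status : String), Dom_no_change_possible match_status → Pre_no_change_possible match_status → Spec_no_change_possible match_status (no_change_possible match_status)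

-- ===== LEMMAS AND PROOFS =====

-- Invariant: B's fold carries the signed difference of A's score fold, and its completion list is
-- nonempty, bounded by A's `left`, and contains both extremes ±left.
theorem pvInv (cs : List Char) (l : List Int) (hpos : ∀ i ∈ l, 0 ≤ i)
    (a b lf : Int) (fs : List Int)
    (h1 : fs ≠ []) (h2 : ∀ f ∈ fs, |f| ≤ lf) (h3 : lf ∈ fs) (h4 : -lf ∈ fs) :
    (l.foldl (pvStepB cs) (a - b, fs)).1
        = (l.foldl (pvStepA cs) (a, b)).1 - (l.foldl (pvStepA cs) (a, b)).2
    ∧ (l.foldl (pvStepB cs) (a - b, fs)).2 ≠ []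
    ∧ (∀ f ∈ (l.foldl (pvStepB cs) (a - b, fs)).2, |f| ≤ l.foldl (pvStepL cs) lf)
    ∧ (l.foldl (pvStepL cs) lf) ∈ (l.foldl (pvStepB cs) (a - b, fs)).2
    ∧ (-(l.foldl (pvStepL cs) lf)) ∈ (l.foldl (pvStepB cs) (a - b, fs)).2 := by
  induction l generalizing a b lf fs with
  | nil => exact ⟨by simp, h1, h2, h3, h4⟩
  | cons i l ih =>
    have hi : 0 ≤ i := hpos i (List.mem_cons_self ..)
    have hpos' : ∀ j ∈ l, 0 ≤ j := fun j hj => hpos j (List.mem_cons_of_mem _ hj)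
    simp only [List.foldl_cons]
    by_cases c1 : pvGetC cs i = '1'
    · have hA : pvStepA cs (a, b) i = (a + 100 * (i + 1), b) := by
        simp [pvStepA, c1]
      have hB : pvStepB cs (a - b, fs) i = ((a + 100 * (i + 1)) - b, fs) := by
        simp [pvStepB, c1]; ring
      have hL : pvStepL cs lf i = lf := by simp [pvStepL, c1]
      rw [hA, hB, hL]
      exact ih hpos' _ _ _ _ h1 h2 h3 h4
    · by_cases c2 : pvGetC cs i = '2'
      · have hA : pvStepA cs (a, b) i = (a, b + 100 * (i + 1)) := by
          simp [pvStepA, c1, c2]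
        have hB : pvStepB cs (a - b, fs) i = (a - (b + 100 * (i + 1)), fs) := by
          simp [pvStepB, c1, c2]; ring
        have hL : pvStepL cs lf i = lf := by simp [pvStepL, c2]
        rw [hA, hB, hL]
        exact ih hpos' _ _ _ _ h1 h2 h3 h4
      · by_cases c0 : pvGetC cs i = '0'
        · have hA : pvStepA cs (a, b) i = (a, b) := by
            simp [pvStepA, c1, c2, c0]
          have hB : pvStepB cs (a - b, fs) i
              = (a - b, fs.flatMap (fun f => [f + -((i + 1) * 100), f + 0, f + (i + 1) * 100])) := by
            simp [pvStepB, c1, c2, c0]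
          have hL : pvStepL cs lf i = lf + (i + 1) * 100 := by simp [pvStepL, c0]
          rw [hA, hB, hL]
          set w : Int := (i + 1) * 100 with hw
          have hw0 : 0 ≤ w := by positivity
          refine ih hpos' a b (lf + w) _ ?_ ?_ ?_ ?_
          · obtain ⟨x, xs, rfl⟩ := List.exists_cons_of_ne_nil h1
            simp [List.flatMap_cons]
          · intro f hf
            simp only [List.mem_flatMap, List.mem_cons] at hf
            obtain ⟨g, hg, hf⟩ := hf
            have hgb := h2 g hg
            rw [abs_le] at hgb ⊢
            rcases hf with rfl | rfl | rfl | h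
            · omega
            · omega
            · omega
            · exact absurd h (by simp)
          · refine List.mem_flatMap.2 ⟨lf, h3, ?_⟩
            exact List.mem_cons_of_mem _ (List.mem_cons_of_mem _ (List.mem_singleton.2 rfl))
          · refine List.mem_flatMap.2 ⟨-lf, h4, ?_⟩
            have he : -(lf + w) = -lf + -w := by ring
            rw [he]
            exact List.mem_cons_self ..
        · by_cases c3 : pvGetC cs i = '3'
          · have hA : pvStepA cs (a, b) i = (a + 50 * (i + 1), b + 50 * (i + 1)) := by
              simp [pvStepA, c1, c2, c3]
            have hB : pvStepB cs (a - b, fs) i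
                = ((a + 50 * (i + 1)) - (b + 50 * (i + 1)), fs) := by
              simp [pvStepB, c1, c2, c0]
            have hL : pvStepL cs lf i = lf := by simp [pvStepL, c0]
            rw [hA, hB, hL]
            exact ih hpos' _ _ _ _ h1 h2 h3 h4
          · have hA : pvStepA cs (a, b) i = (a, b) := by
              simp [pvStepA, c1, c2, c3]
            have hB : pvStepB cs (a - b, fs) i = (a - b, fs) := by
              simp [pvStepB, c1, c2, c0]
            have hL : pvStepL cs lf i = lf := by simp [pvStepL, c0]
            rw [hA, hB, hL]
            exact ih hpos' _ _ _ _ h1 h2 h3 h4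

theorem pvSign_pos (x : Int) (h : 0 < x) : pvSign x = 1 := by simp [pvSign, h]; omega
theorem pvSign_neg (x : Int) (h : x < 0) : pvSign x = -1 := by simp [pvSign, h]; omega
theorem pvSign_zero : pvSign 0 = 0 := by simp [pvSign]

-- whole completion list on one side of zero ↔ |d| > L ∨ L = 0
theorem pvFinal (d L : Int) (fs : List Int)
    (h1 : fs ≠ []) (h2 : ∀ f ∈ fs, |f| ≤ L) (h3 : L ∈ fs) (h4 : -L ∈ fs) :
    (fs.all fun f => pvSign (d + f) == pvSign (d + (PySem.List.pyGet? fs 0).getD 0))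
      = (if |d| > L ∨ L = 0 then true else false) := by
  have hL0 : 0 ≤ L := le_trans (abs_nonneg L) (h2 L h3)
  obtain ⟨x, xs, rfl⟩ := List.exists_cons_of_ne_nil h1
  have hget : (PySem.List.pyGet? (x :: xs) 0).getD 0 = x := by
    simp [PySem.List.pyGet?, PySem.List.pyIdx?]
  rw [hget]
  by_cases hgt : |d| > L
  · -- every completion keeps the sign of d
    have hsame : ∀ f ∈ x :: xs, pvSign (d + f) = pvSign d := by
      intro f hf
      have hb := h2 f hf
      rw [abs_le] at hb
      rcases lt_trichotomy d 0 with hd | hd | hd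
      · rw [pvSign_neg d hd, pvSign_neg]
        have : |d| = -d := abs_of_neg hd
        omega
      · exfalso; simp [hd] at hgt; omega
      · rw [pvSign_pos d hd, pvSign_pos]
        have : |d| = d := abs_of_pos hd
        omega
    have : ((x :: xs).all fun f => pvSign (d + f) == pvSign (d + x)) = true := by
      rw [List.all_eq_true]
      intro f hf
      rw [beq_iff_eq, hsame f hf, hsame x (List.mem_cons_self ..)]
    rw [this]; simp [hgt]
  · by_cases hz : L = 0
    · -- no undecided problems: the only completion is 0
      subst hz
      have hall0 : ∀ f ∈ x :: xs, f = 0 := by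
        intro f hf; have := h2 f hf; simpa using this
      have : ((x :: xs).all fun f => pvSign (d + f) == pvSign (d + x)) = true := by
        rw [List.all_eq_true]
        intro f hf
        rw [hall0 f hf, hall0 x (List.mem_cons_self ..)]
        exact beq_self_eq_true _
      rw [this]; simp
    · -- both outcomes still reachable: ±L give different signs
      have hLpos : 0 < L := lt_of_le_of_ne hL0 (Ne.symm hz)
      have hdle : |d| ≤ L := le_of_not_gt hgt
      rw [abs_le] at hdle
      have hne : pvSign (d + L) ≠ pvSign (d + -L) := by
        rcases lt_or_eq_of_le (show (0:Int) ≤ d + L by omega) with hp | hp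
        · rw [pvSign_pos _ hp]
          rcases lt_or_eq_of_le (show d + -L ≤ 0 by omega) with hm | hm
          · rw [pvSign_neg _ hm]; decide
          · rw [hm, pvSign_zero]; decide
        · have hm : d + -L < 0 := by omega
          rw [← hp, pvSign_zero, pvSign_neg _ hm]; decide
      have : ((x :: xs).all fun f => pvSign (d + f) == pvSign (d + x)) = false := by
        rw [List.all_eq_false]
        by_cases hs : pvSign (d + L) = pvSign (d + x)
        · exact ⟨-L, h4, by simp only [beq_iff_eq]; intro h; exact hne (hs.trans h.symm)⟩
        · exact ⟨L, h3, by simp only [beq_iff_eq]; exact hs⟩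
      rw [this]; simp [hgt, hz]

-- ===== VERDICT (by name: the statement is the Claim_ definition above) =====
theorem no_change_possible_spec : Claim_equal_no_change_possible := by
  intro s _ _
  unfold Spec_no_change_possible no_change_possible no_change_possible_alt match_score
  dsimp only
  have hpos : ∀ i ∈ PySem.List.pyRange 0 5 1, (0:Int) ≤ i := by decide
  have hinv := pvInv s.toList (PySem.List.pyRange 0 5 1) hpos 0 0 0 [0]
    (by simp) (by intro f hf; simp at hf; simp [hf]) (by simp) (by simp)
  simp only [show (0:Int) - 0 = 0 by ring] at hinv
  obtain ⟨hd, hne, hbnd, hmem, hmemn⟩ := hinv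
  rw [← hd]
  exact (pvFinal _ _ _ hne hbnd hmem hmemn).symm
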